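-- pv_equiv track=rewrite | github.com/haxscramper/hack | testing/python/image_tagger/src/image_tagger/gui/fuzzy_file_selector.py | fuzzy_positions
-- ===== SOURCE A (Python) =====
-- def normalize_text(text: str) -> str:
--     return text.casefold()
--
-- def fuzzy_positions(needle: str, haystack: str) -> list[int] | None:
--     if not needle:
--         return []
--
--     n = normalize_text(needle)
--     h = normalize_text(haystack)
--
--     positions: list[int] = []
--     start = 0
--     for ch in n:
--         idx = h.find(ch, start)
--         if idx == -1:
--             return None
--         positions.append(idx)
--         start = idx + 1
--     return positions
-- ===== SOURCE B (Python) =====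
-- def fuzzy_positions(needle: str, haystack: str) -> list[int] | None:
--     n = needle.casefold()
--     rest = n  # needle characters still to be matched
--     positions: list[int] = []
--     for i, ch in enumerate(haystack.casefold()):
--         if rest and ch == rest[0]:
--             positions.append(i)
--             rest = rest[1:]
--     return positions if not rest else None
-- ===== Notes on version B (the rewrite author's own statement) =====
-- stated objective: idiomatic
-- what changed: Replaced the per-needle-char h.find scans with a single forward pass over the casefolded haystack that advances a remaining-needle suffix as characters match.
import Mathlib
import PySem

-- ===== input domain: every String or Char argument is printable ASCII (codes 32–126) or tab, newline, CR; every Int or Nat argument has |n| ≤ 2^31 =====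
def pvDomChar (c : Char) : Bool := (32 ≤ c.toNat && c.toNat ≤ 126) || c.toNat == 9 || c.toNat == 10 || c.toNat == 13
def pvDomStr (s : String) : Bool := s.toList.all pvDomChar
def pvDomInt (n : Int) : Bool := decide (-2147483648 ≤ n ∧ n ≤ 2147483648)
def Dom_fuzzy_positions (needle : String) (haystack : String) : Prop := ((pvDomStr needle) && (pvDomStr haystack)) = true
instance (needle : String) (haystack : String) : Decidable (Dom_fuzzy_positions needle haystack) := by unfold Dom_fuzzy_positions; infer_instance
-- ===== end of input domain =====

-- B replaces A's per-needle-character h.find scans with one forward pass over the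
-- casefolded haystack that advances through the needle as characters match (idiomatic single scan).
-- str.casefold coincides with str.lower on the printable-ASCII Dom, so both ports use PySem.Str.lower.

-- ===== PORT A =====
-- the 'for ch in n' loop of A: state = (positions, start)
def pvAGo : List Char → List Char → Int → List Int → Option (List Int)
  | [], _, _, acc => some acc
  | c :: ncs, h, start, acc =>
    let idx := PySem.Chars.findFrom h [c] start none   -- h.find(ch, start)
    if idx = -1 then none
    else pvAGo ncs h (idx + 1) (acc ++ [idx])

def fuzzy_positions (needle : String) (haystack : String) : Option (List Int) :=
  if needle = "" then some [] else
  pvAGo (PySem.Str.lower needle).toList (PySem.Str.lower haystack).toList 0 []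

-- ===== PORT B =====
-- the 'for i, ch in enumerate(h)' loop of B: state = (positions, rest of the needle)
def pvBGo : List Char → Nat → List Char → List Int → List Int × List Char
  | [], _, rest, acc => (acc, rest)
  | c :: hs, i, rest, acc =>
    match rest with
    | [] => pvBGo hs (i + 1) [] acc
    | r :: rs =>
      if c = r then pvBGo hs (i + 1) rs (acc ++ [(i : Int)])
      else pvBGo hs (i + 1) (r :: rs) acc

def fuzzy_positions_alt (needle : String) (haystack : String) : Option (List Int) :=
  match pvBGo (PySem.Str.lower haystack).toList 0 (PySem.Str.lower needle).toList [] with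
  | (pos, []) => some pos
  | (_, _ :: _) => none

-- ===== PRECONDITION & SPEC =====
def Spec_fuzzy_positions (needle : String) (haystack : String) (out : Option (List Int)) : Prop := out = fuzzy_positions_alt needle haystack
instance (needle : String) (haystack : String) (out : Option (List Int)) : Decidable (Spec_fuzzy_positions needle haystack out) := by unfold Spec_fuzzy_positions; infer_instance

-- ===== CLAIM (what is proved, stated in full; the proofs are below) =====
def Claim_equal_fuzzy_positions : Prop := ∀ (needle : String) (haystack : String), Dom_fuzzy_positions needle haystack → Spec_fuzzy_positions needle haystack (fuzzy_positions needle haystack)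

-- ===== LEMMAS AND PROOFS =====

-- first index of character c in a list, as a plain recursion
def pvFirstIdx (c : Char) : List Char → Option Nat
  | [] => none
  | x :: xs => if x = c then some 0 else (pvFirstIdx c xs).map (· + 1)

theorem pv_singleton_prefix (c : Char) (l : List Char) : [c] <+: l ↔ l.head? = some c := by
  cases l with
  | nil => simp
  | cons a l => simp [List.cons_prefix_cons, eq_comm]

theorem pv_singleton_prefix_drop (c : Char) (hs : List Char) (j : Nat) :
    [c] <+: hs.drop j ↔ hs[j]? = some c := by
  rw [pv_singleton_prefix, List.head?_drop]

theorem pvFirstIdx_none (c : Char) : ∀ hs : List Char, pvFirstIdx c hs = none → ∀ j : Nat, hs[j]? ≠ some c := by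
  intro hs
  induction hs with
  | nil => intro _ j; simp
  | cons x xs ih =>
    intro h j
    by_cases hx : x = c
    · simp [pvFirstIdx, hx] at h
    · simp [pvFirstIdx, hx] at h
      cases j with
      | zero => simpa using hx
      | succ j => simpa using ih h j

theorem pvFirstIdx_some (c : Char) :
    ∀ (hs : List Char) (j : Nat), pvFirstIdx c hs = some j → hs[j]? = some c ∧ ∀ i < j, hs[i]? ≠ some c := by
  intro hs
  induction hs with
  | nil => intro j h; simp [pvFirstIdx] at h
  | cons x xs ih =>
    intro j h
    by_cases hx : x = c
    · simp [pvFirstIdx, hx] at h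
      subst h; simpa using hx
    · simp [pvFirstIdx, hx] at h
      obtain ⟨j', hj', rfl⟩ := h
      obtain ⟨h1, h2⟩ := ih j' hj'
      refine ⟨by simpa using h1, ?_⟩
      intro i hi
      cases i with
      | zero => simpa using hx
      | succ i => simpa using h2 i (by omega)

-- Chars.find on a single-character needle computes pvFirstIdx
theorem pv_find_single (c : Char) (hs : List Char) :
    PySem.Chars.find hs [c] = (match pvFirstIdx c hs with | none => (-1 : Int) | some j => (j : Int)) := by
  cases hfi : pvFirstIdx c hs with
  | none =>
    have hnone := pvFirstIdx_none c hs hfi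
    rw [PySem.Chars.find_eq_neg_one_iff]
    intro hinf
    have : PySem.Chars.isIn [c] hs = true := (PySem.Chars.isIn_iff_infix _ _).2 hinf
    obtain ⟨j, hj⟩ := (PySem.Chars.exists_prefix_drop_iff_isIn (sub := [c]) (s := hs)).2 this
    exact hnone j ((pv_singleton_prefix_drop c hs j).1 hj)
  | some j =>
    obtain ⟨h1, h2⟩ := pvFirstIdx_some c hs j hfi
    have hpre : [c] <+: hs.drop j := (pv_singleton_prefix_drop c hs j).2 h1
    have hne : PySem.Chars.find hs [c] ≠ -1 := by
      rw [PySem.Chars.find_ne_neg_one_iff]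
      exact ((PySem.Chars.exists_prefix_drop_iff_isIn (sub := [c]) (s := hs)).1 ⟨j, hpre⟩ |>
        (PySem.Chars.isIn_iff_infix _ _).1)
    have hnn : 0 ≤ PySem.Chars.find hs [c] := by
      rcases lt_or_ge (PySem.Chars.find hs [c]) 0 with hlt | hge
      · exact absurd (by omega : PySem.Chars.find hs [c] = -1 ∨ PySem.Chars.find hs [c] < -1)
          (by
            rcases (by omega : PySem.Chars.find hs [c] = -1 ∨ PySem.Chars.find hs [c] < -1) with h | h
            · exact absurd h hne
            · exact absurd h (by have := PySem.Chars.neg_one_le_find hs [c]; omega))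
      · exact hge
    obtain ⟨hp, hmin⟩ := PySem.Chars.find_spec (s := hs) (sub := [c]) hnn
    set t := (PySem.Chars.find hs [c]).toNat with ht
    have htj : t = j := by
      rcases Nat.lt_trichotomy t j with h | h | h
      · exact absurd ((pv_singleton_prefix_drop c hs t).1 hp) (h2 t h)
      · exact h
      · exact absurd hpre (hmin j (by omega))
    have : PySem.Chars.find hs [c] = (t : Int) := (Int.toNat_of_nonneg hnn).symm
    rw [this, htj]

theorem pvBGo_nil_needle : ∀ (hs : List Char) (i : Nat) (acc : List Int),
    pvBGo hs i [] acc = (acc, []) := by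
  intro hs
  induction hs with
  | nil => intro i acc; rfl
  | cons c hs ih => intro i acc; simpa [pvBGo] using ih (i + 1) acc

theorem pvBGo_skip : ∀ (hs : List Char) (i : Nat) (r : Char) (rs : List Char) (acc : List Int),
    pvBGo hs i (r :: rs) acc =
      (match pvFirstIdx r hs with
       | none => (acc, r :: rs)
       | some j => pvBGo (hs.drop (j + 1)) (i + j + 1) rs (acc ++ [((i + j : Nat) : Int)])) := by
  intro hs
  induction hs with
  | nil => intro i r rs acc; rfl
  | cons c hs ih =>
    intro i r rs acc
    by_cases hc : c = r
    · subst hc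
      simp [pvBGo, pvFirstIdx]
    · simp only [pvBGo, pvFirstIdx, if_neg hc]
      rw [ih (i + 1) r rs acc]
      cases hfi : pvFirstIdx r hs with
      | none => simp
      | some j =>
        simp only [Option.map_some]
        have h1 : i + 1 + j + 1 = i + (j + 1) + 1 := by omega
        have h2 : (i + 1 + j : Nat) = (i + (j + 1) : Nat) := by omega
        rw [h1, h2, List.drop_succ_cons]

theorem pv_main : ∀ (ncs h : List Char) (start : Nat) (acc : List Int), start ≤ h.length →
    pvAGo ncs h (start : Int) acc =
      (match pvBGo (h.drop start) start ncs acc with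
       | (pos, []) => some pos
       | (_, _ :: _) => none) := by
  intro ncs
  induction ncs with
  | nil =>
    intro h start acc _
    rw [pvBGo_nil_needle]
    rfl
  | cons c ncs ih =>
    intro h start acc hle
    rw [pvBGo_skip]
    simp only [pvAGo]
    rw [PySem.Chars.findFrom_natCast h [c] start hle, pv_find_single]
    cases hfi : pvFirstIdx c (h.drop start) with
    | none => simp
    | some j =>
      obtain ⟨h1, _⟩ := pvFirstIdx_some c (h.drop start) j hfi
      have hj : j < h.length - start := by
        have := List.getElem?_eq_some_iff.1 h1
        obtain ⟨hlt, _⟩ := this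
        simpa [List.length_drop] using hlt
      have hne : ¬ ((j : Int) = -1) := by omega
      have hne2 : ¬ ((start : Int) + j = -1) := by omega
      simp only [if_neg hne, if_neg hne2]
      have hle2 : start + j + 1 ≤ h.length := by omega
      have hcast : (start : Int) + (j : Int) + 1 = ((start + j + 1 : Nat) : Int) := by push_cast; ring
      have hcast2 : (start : Int) + (j : Int) = ((start + j : Nat) : Int) := by push_cast; ring
      rw [hcast, hcast2, ih h (start + j + 1) (acc ++ [((start + j : Nat) : Int)]) hle2]
      rw [List.drop_drop]
      have h3 : start + (j + 1) = start + j + 1 := by omega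
      rw [h3]

-- ===== VERDICT (by name: the statement is the Claim_ definition above) =====
theorem fuzzy_positions_spec : Claim_equal_fuzzy_positions := by
  intro needle haystack _
  unfold Spec_fuzzy_positions fuzzy_positions fuzzy_positions_alt
  by_cases hn : needle = ""
  · subst hn
    simp [PySem.Str.lower, PySem.Chars.lower, pvBGo_nil_needle]
  · rw [if_neg hn]
    have := pv_main (PySem.Str.lower needle).toList (PySem.Str.lower haystack).toList 0 [] (by omega)
    simpa using this
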